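-- pv_equiv track=rewrite | github.com/hhqx/leetcode | exercise/0311美团笔试/修改数字字符串使之不连续.py | Min_Change
-- ===== SOURCE A (Python) =====
-- def Min_Change(s: str):
--     n = len(s)
--     start = -1
--     ans = 0
--     for i, c in enumerate(s):
--         if i == n-1 or s[i] != s[i+1]:
--             cnt = i - start
--             start = i
--             ans += cnt - 1
--
--     return ans
-- ===== SOURCE B (Python) =====
-- def Min_Change(s: str):
--     return sum(1 for a, b in zip(s, s[1:]) if a == b)
-- ===== Notes on version B (the rewrite author's own statement) =====
-- stated objective: idiomatic
-- what changed: Replaces the run-boundary tracking (start index, boundary test, run-length arithmetic) with a single pairwise count of adjacent equal characters over zip(s, s[1:]).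
import Mathlib
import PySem

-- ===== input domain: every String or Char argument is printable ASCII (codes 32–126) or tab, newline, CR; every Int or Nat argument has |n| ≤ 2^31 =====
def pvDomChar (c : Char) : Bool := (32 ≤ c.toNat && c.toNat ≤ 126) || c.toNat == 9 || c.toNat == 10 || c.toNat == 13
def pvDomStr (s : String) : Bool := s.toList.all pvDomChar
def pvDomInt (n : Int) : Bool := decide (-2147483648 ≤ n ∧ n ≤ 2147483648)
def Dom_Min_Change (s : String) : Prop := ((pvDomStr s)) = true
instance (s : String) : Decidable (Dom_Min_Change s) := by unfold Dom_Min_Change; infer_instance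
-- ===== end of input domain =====

-- B replaces A's run-boundary tracking (start index, boundary test, run-length
-- arithmetic) with a single idiomatic count of adjacent equal character pairs.

-- ===== PORT A =====
-- literal transliteration of A: for (i, c) in enumerate(s), with state (start, ans);
-- the loop body uses the index i only (Python reads s[i] and s[i+1], never c).
def Min_Change (s : String) : Int :=
  ((PySem.List.enumerate s.toList 0).foldl
    (fun (st : Int × Int) (ic : Int × Char) =>
      if ic.1 = (s.toList.length : Int) - 1 ∨
          PySem.List.pyGet? s.toList ic.1 ≠ PySem.List.pyGet? s.toList (ic.1 + 1) then
        (ic.1, st.2 + ((ic.1 - st.1) - 1))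
      else st)
    (-1, 0)).2

-- ===== PORT B =====
-- literal transliteration of Source B: count pairs (a, b) in zip(s, s[1:]) with a == b
def Min_Change_alt (s : String) : Int :=
  (((s.toList.zip s.toList.tail).filter (fun p => p.1 == p.2)).length : Int)

-- ===== PRECONDITION & SPEC =====
def Spec_Min_Change (s : String) (out : Int) : Prop := out = Min_Change_alt s
instance (s : String) (out : Int) : Decidable (Spec_Min_Change s out) := by unfold Spec_Min_Change; infer_instance

-- ===== CLAIM (what is proved, stated in full; the proofs are below) =====
def Claim_equal_Min_Change : Prop := ∀ (s : String), Dom_Min_Change s → Spec_Min_Change s (Min_Change s)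

-- ===== LEMMAS AND PROOFS =====

/-- number of adjacent equal pairs in a list, as an Int -/
def pvCountEq : List Char → Int
  | a :: b :: t => (if a = b then 1 else 0) + pvCountEq (b :: t)
  | _ => 0

lemma pvCountEq_zip : ∀ (l : List Char),
    (((l.zip l.tail).filter (fun p => p.1 == p.2)).length : Int) = pvCountEq l
  | [] => by simp [pvCountEq]
  | [a] => by simp [pvCountEq]
  | a :: b :: t => by
    have ih := pvCountEq_zip (b :: t)
    simp only [List.tail_cons, List.zip_cons_cons, List.filter_cons, pvCountEq] at *
    by_cases h : a = b <;> simp [h, ← ih] <;> omega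

lemma pvCountEq_drop (cs : List Char) (j : Nat) (h : j + 1 < cs.length) :
    pvCountEq (cs.drop j) =
      (if cs[j] = cs[j+1] then 1 else 0) + pvCountEq (cs.drop (j+1)) := by
  have h1 : cs.drop j = cs[j] :: cs.drop (j + 1) :=
    List.drop_eq_getElem_cons (by omega)
  have h2 : cs.drop (j + 1) = cs[j+1] :: cs.drop (j + 2) :=
    List.drop_eq_getElem_cons (by omega)
  rw [h1, h2, pvCountEq]

lemma pvCountEq_drop_last (cs : List Char) (j : Nat) (h : j + 1 = cs.length) :
    pvCountEq (cs.drop j) = 0 := by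
  have h1 : cs.drop j = cs[j]'(by omega) :: cs.drop (j + 1) :=
    List.drop_eq_getElem_cons (by omega)
  rw [h1, List.drop_of_length_le (by omega)]
  rfl

/-- the loop step of port A, with the whole list and its length fixed -/
def pvStep (cs : List Char) (n : Int) (st : Int × Int) (i : Int) : Int × Int :=
  if i = n - 1 ∨ PySem.List.pyGet? cs i ≠ PySem.List.pyGet? cs (i + 1) then
    (i, st.2 + ((i - st.1) - 1))
  else st

/-- invariant of A's loop: from index j on, the fold adds pvCountEq of the
    remaining suffix plus the boundary correction (j - 1 - start). -/
lemma pvLoop (cs : List Char) : ∀ (k j : Nat) (s0 a : Int),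
    cs.length - j = k → j < cs.length →
    ((PySem.List.pyRange (j : Int) (cs.length : Int) 1).foldl
        (pvStep cs (cs.length : Int)) (s0, a)).2
      = a + pvCountEq (cs.drop j) + ((j : Int) - 1 - s0)
  | 0, j, s0, a, hk, hj => by omega
  | k + 1, j, s0, a, hk, hj => by
    rw [PySem.List.pyRange_one_cons (by exact_mod_cast hj)]
    rw [List.foldl_cons]
    by_cases hlast : j + 1 = cs.length
    · -- j is the last index: boundary fires, rest of the range is empty
      have hcond : (j : Int) = (cs.length : Int) - 1 := by omega
      have : PySem.List.pyRange ((j : Int) + 1) (cs.length : Int) 1 = [] :=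
        PySem.List.pyRange_one_eq_nil (by omega)
      rw [this]
      simp only [pvStep]
      rw [if_pos (Or.inl hcond)]
      simp only [List.foldl_nil]
      rw [pvCountEq_drop_last cs j hlast]
      omega
    · -- j < n - 1: the condition is cs[j] ≠ cs[j+1]
      have hj1 : j + 1 < cs.length := by omega
      have hg1 : PySem.List.pyGet? cs (j : Int) = some cs[j] := by
        rw [PySem.List.pyGet?_natCast]
        exact List.getElem?_eq_getElem hj
      have hg2 : PySem.List.pyGet? cs ((j : Int) + 1) = some cs[j+1] := by
        have : ((j : Int) + 1) = ((j + 1 : Nat) : Int) := by push_cast; ring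
        rw [this, PySem.List.pyGet?_natCast]
        exact List.getElem?_eq_getElem hj1
      have hne : (j : Int) ≠ (cs.length : Int) - 1 := by omega
      have harith : ((j : Int) + 1) = (((j + 1 : Nat) : Int)) := by push_cast; ring
      by_cases heq : cs[j] = cs[j+1]
      · -- equal pair: step is a no-op, one equal pair is counted in the suffix
        have hcond : ¬ ((j : Int) = (cs.length : Int) - 1 ∨
            PySem.List.pyGet? cs (j : Int) ≠ PySem.List.pyGet? cs ((j : Int) + 1)) := by
          rw [hg1, hg2, heq]; simp [hne]
        rw [show pvStep cs (cs.length : Int) (s0, a) (j : Int) = (s0, a) by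
          simp only [pvStep]; rw [if_neg hcond]]
        rw [harith, pvLoop cs k (j + 1) s0 a (by omega) hj1]
        rw [pvCountEq_drop cs j hj1, if_pos heq]
        push_cast
        ring
      · -- boundary: ans += j - start - 1, start := j
        have hcond : ((j : Int) = (cs.length : Int) - 1 ∨
            PySem.List.pyGet? cs (j : Int) ≠ PySem.List.pyGet? cs ((j : Int) + 1)) := by
          rw [hg1, hg2]
          exact Or.inr (by simpa using heq)
        rw [show pvStep cs (cs.length : Int) (s0, a) (j : Int)
              = ((j : Int), a + (((j : Int) - s0) - 1)) by
            simp only [pvStep]; rw [if_pos hcond]]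
        rw [harith, pvLoop cs k (j + 1) (j : Int) (a + (((j : Int) - s0) - 1))
              (by omega) hj1]
        rw [pvCountEq_drop cs j hj1, if_neg heq]
        push_cast
        ring

lemma pvTop (cs : List Char) :
    ((PySem.List.pyRange 0 (cs.length : Int) 1).foldl
        (pvStep cs (cs.length : Int)) (-1, 0)).2 = pvCountEq cs := by
  rcases cs with _ | ⟨c, t⟩
  · simp [PySem.List.pyRange_one_eq_nil, pvCountEq]
  · have hlen : 0 < (c :: t).length := by simp
    have h := pvLoop (c :: t) (c :: t).length 0 (-1) 0 (by omega) hlen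
    simp only [Nat.cast_zero] at h
    rw [h]
    simp

lemma pvMinChange_eq_countEq (s : String) : Min_Change s = pvCountEq s.toList := by
  have key : Min_Change s =
      ((PySem.List.pyRange 0 (s.toList.length : Int) 1).foldl
        (pvStep s.toList (s.toList.length : Int)) (-1, 0)).2 := by
    unfold Min_Change
    rw [PySem.List.enumerate_eq_map_pyRange s.toList ' ', List.foldl_map]
    simp only [PySem.List.len_eq]
    rfl
  rw [key, pvTop]

-- ===== VERDICT (by name: the statement is the Claim_ definition above) =====
theorem Min_Change_spec : Claim_equal_Min_Change := by
  intro s _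
  unfold Spec_Min_Change Min_Change_alt
  rw [pvMinChange_eq_countEq, pvCountEq_zip]
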